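-- pv_equiv track=rewrite | github.com/lonemadmax/hk-gerrit-follow | review.py | _list_new_messages
-- ===== SOURCE A (Python) =====
-- def _list_new_messages(messages):
--     limit = 1400
--     s = []
--     for m in messages:
--         if limit < 0:
--             s.append('...')
--             break
--         limit -= len(m)
--         s.append(m)
--     return '\n'.join(s)
-- ===== SOURCE B (Python) =====
-- def _list_new_messages(messages):
--     msgs = list(messages)
--     cum = []
--     total = 0
--     for m in msgs:
--         total += len(m)
--         cum.append(total)
--     t = next((i for i, c in enumerate(cum) if c > 1400), None)
--     if t is None:
--         return '\n'.join(msgs)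
--     parts = msgs[:t + 1]
--     if t + 1 < len(msgs):
--         parts.append('...')
--     return '\n'.join(parts)
-- ===== Notes on version B (the rewrite author's own statement) =====
-- stated objective: alternative
-- what changed: Replaces the budget-decrementing loop with a break by a prefix-sum pass plus a first-index search over the cumulative lengths, then a slice with an optional ellipsis.
import Mathlib
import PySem

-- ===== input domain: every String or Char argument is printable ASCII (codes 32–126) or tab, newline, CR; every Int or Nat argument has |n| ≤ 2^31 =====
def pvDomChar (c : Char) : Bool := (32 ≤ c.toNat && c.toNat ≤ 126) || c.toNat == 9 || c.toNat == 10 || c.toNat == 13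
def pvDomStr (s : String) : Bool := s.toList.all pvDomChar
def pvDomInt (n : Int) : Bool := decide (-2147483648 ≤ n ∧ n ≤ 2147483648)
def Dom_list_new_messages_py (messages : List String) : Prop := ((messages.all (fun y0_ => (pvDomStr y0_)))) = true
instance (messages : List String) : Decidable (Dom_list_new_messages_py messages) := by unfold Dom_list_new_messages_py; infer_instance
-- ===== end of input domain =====

-- B replaces A's budget-decrementing loop-with-break by a prefix-sum pass plus a
-- first-index search; alternative decomposition, same cost, return values proved equal.

-- ===== PORT A =====
-- A's for-loop over messages with the mutable 'limit' budget and early break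
def pvLoopA : Int → List String → List String
  | _, [] => []
  | limit, m :: rest =>
    if limit < 0 then ["..."]
    else m :: pvLoopA (limit - PySem.Str.len m) rest

def list_new_messages_py (messages : List String) : String :=
  PySem.Str.join "\n" (pvLoopA 1400 messages)

-- ===== PORT B =====
-- B's first pass: cumulative lengths (cum/total loop in Source B)
def pvCums : Int → List String → List Int
  | _, [] => []
  | total, m :: rest =>
    (total + PySem.Str.len m) :: pvCums (total + PySem.Str.len m) rest

-- Source B's 'next((i for i, c in enumerate(cum) if c > 1400), None)' is List.findIdx?;
-- msgs[:t+1] with t+1 ≥ 0 is List.take (t+1)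
def list_new_messages_py_alt (messages : List String) : String :=
  match (pvCums 0 messages).findIdx? (fun c => decide (1400 < c)) with
  | none => PySem.Str.join "\n" messages
  | some t =>
    PySem.Str.join "\n"
      (messages.take (t + 1) ++ (if t + 1 < messages.length then ["..."] else []))

-- ===== PRECONDITION & SPEC =====
def Spec_list_new_messages_py (messages : List String) (out : String) : Prop := out = list_new_messages_py_alt messages
instance (messages : List String) (out : String) : Decidable (Spec_list_new_messages_py messages out) := by unfold Spec_list_new_messages_py; infer_instance

-- ===== CLAIM (what is proved, stated in full; the proofs are below) =====
def Claim_equal_list_new_messages_py : Prop := ∀ (messages : List String), Dom_list_new_messages_py messages → Spec_list_new_messages_py messages (list_new_messages_py messages)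

-- ===== LEMMAS AND PROOFS =====

lemma pvLoopA_of_neg (msgs : List String) (limit : Int) (h : limit < 0) :
    pvLoopA limit msgs = if msgs = [] then [] else ["..."] := by
  cases msgs <;> simp [pvLoopA, h]

lemma pvLoopA_key (msgs : List String) (acc : Int) (hacc : acc ≤ 1400) :
    pvLoopA (1400 - acc) msgs =
      match (pvCums acc msgs).findIdx? (fun c => decide (1400 < c)) with
      | none => msgs
      | some t => msgs.take (t + 1) ++ (if t + 1 < msgs.length then ["..."] else []) := by
  induction msgs generalizing acc with
  | nil => simp [pvLoopA, pvCums]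
  | cons m rest ih =>
    have hL : (0:Int) ≤ PySem.Str.len m := by
      simp [PySem.Str.len_eq]
    have hnn : ¬ (1400 - acc < 0) := by omega
    by_cases hc : (1400:Int) < acc + PySem.Str.len m
    · have hneg : 1400 - acc - PySem.Str.len m < 0 := by omega
      simp only [pvLoopA, pvCums, hnn, if_false, List.findIdx?_cons, hc, decide_true]
      rw [show 1400 - acc - PySem.Str.len m = 1400 - (acc + PySem.Str.len m) by ring] at *
      rw [pvLoopA_of_neg _ _ hneg]
      cases rest <;> simp
    · have hle : acc + PySem.Str.len m ≤ 1400 := by omega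
      have := ih (acc + PySem.Str.len m) hle
      simp only [pvLoopA, pvCums, hnn, if_false, List.findIdx?_cons, hc, decide_false]
      rw [show 1400 - acc - PySem.Str.len m = 1400 - (acc + PySem.Str.len m) by ring, this]
      cases hfi : (pvCums (acc + PySem.Str.len m) rest).findIdx? (fun c => decide (1400 < c)) with
      | none => simp
      | some t =>
        simp only [Option.map_some]
        simp [List.take_succ_cons]

-- ===== VERDICT (by name: the statement is the Claim_ definition above) =====
theorem list_new_messages_py_spec : Claim_equal_list_new_messages_py := by
  intro messages _
  show _ = _
  unfold list_new_messages_py list_new_messages_py_alt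
  have h := pvLoopA_key messages 0 (by norm_num)
  norm_num at h
  rw [h]
  cases (pvCums 0 messages).findIdx? (fun c => decide (1400 < c)) <;> rfl
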